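-- pv_equiv track=rewrite | github.com/ShawonSUSTSWE/CP | Python/Check.py | check_awesomeness
-- ===== SOURCE A (Python) =====
-- def check_awesomeness (x):
--     prev = -1
--     current = 0
--     test = x
--     while test > 0:
--         current = test%10
--         test //= 10
--         if current <= prev:
--             return False
--         prev = current
--
--     if x == current:
--         return  False
--     return  True
-- ===== SOURCE B (Python) =====
-- def check_awesomeness(x):
--     if x < 10:
--         return False
--     s = str(x)
--     return all(a > b for a, b in zip(s, s[1:]))
-- ===== Notes on version B (the rewrite author's own statement) =====
-- stated objective: idiomatic
-- what changed: B tests the strictly-decreasing-digits property on the decimal string str(x) with a single all() over adjacent character pairs and a guard clause requiring at least two digits, instead of A's stateful digit-peeling modulus/division loop with a prev sentinel and a post-loop x==current equality check; Pre_ restricts to non-negative x, the task's natural domain, since on negative x A's True is only the skipped loop falling through.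
-- outside the precondition, e.g. on check_awesomeness(-5): A returns True, B returns False
import Mathlib
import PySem

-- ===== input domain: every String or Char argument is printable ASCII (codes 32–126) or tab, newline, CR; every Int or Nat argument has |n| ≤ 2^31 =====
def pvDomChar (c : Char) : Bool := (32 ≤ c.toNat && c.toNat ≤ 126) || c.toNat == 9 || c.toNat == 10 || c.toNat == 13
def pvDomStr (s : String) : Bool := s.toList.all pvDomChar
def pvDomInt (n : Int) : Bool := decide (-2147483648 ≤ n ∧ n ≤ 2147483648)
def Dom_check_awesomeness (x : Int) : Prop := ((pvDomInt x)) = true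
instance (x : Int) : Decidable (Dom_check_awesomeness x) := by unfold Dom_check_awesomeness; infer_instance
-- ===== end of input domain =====

-- B tests the property on the decimal string (a two-digit-minimum guard clause, one adjacent-pair all())
-- instead of A's %10//10 loop; same values on Pre_ (x >= 0), no speed claim.

-- ===== PORT A =====
-- A's while loop: state (test, prev, current); 'none' = the early 'return False'.
def awLoop (test prev current : Int) : Option Int :=
  if _h : test > 0 then
    let current' := PySem.Int.mod test 10
    let test' := PySem.Int.floordiv test 10
    if current' ≤ prev then none
    else awLoop test' current' current'
  else some current
termination_by test.toNat
decreasing_by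
  rw [PySem.Int.floordiv_eq_ediv_of_pos (by norm_num)]
  omega

def check_awesomeness (x : Int) : Bool :=
  match awLoop x (-1) 0 with
  | none => false
  | some current => if x = current then false else true

-- ===== PORT B =====
-- str(x) is PySem.Int.toChars; zip(s, s[1:]) is s.zip s.tail; all(a > b …) is List.all.
def check_awesomeness_alt (x : Int) : Bool :=
  if x < 10 then false
  else
    let s := PySem.Int.toChars x
    (s.zip s.tail).all (fun p => decide (p.2 < p.1))

-- ===== PRECONDITION & SPEC =====
-- Pre_ restricts to the task's natural domain, non-negative integers: for negative x the
-- digit loop never runs, so A's True there is an artefact of the skipped loop, and B (which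
-- reads the decimal string) naturally returns False.
def Pre_check_awesomeness (x : Int) : Prop := 0 ≤ x
instance (x : Int) : Decidable (Pre_check_awesomeness x) := by unfold Pre_check_awesomeness; infer_instance

def pvWitness_check_awesomeness : Int := (321)

def Spec_check_awesomeness (x : Int) (out : Bool) : Prop := out = check_awesomeness_alt x
instance (x : Int) (out : Bool) : Decidable (Spec_check_awesomeness x out) := by unfold Spec_check_awesomeness; infer_instance

-- ===== CLAIM (what is proved, stated in full; the proofs are below) =====
def Claim_equal_check_awesomeness : Prop := ∀ (x : Int), Dom_check_awesomeness x → Pre_check_awesomeness x → Spec_check_awesomeness x (check_awesomeness x)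

-- ===== LEMMAS AND PROOFS =====

-- A's loop, rephrased over the (LSB-first) digit list.
def awChk (prev cur : Int) : List Nat → Option Int
  | [] => some cur
  | d :: ds => if (d : Int) ≤ prev then none else awChk d d ds

-- adjacent strict increase, Nat list
def incN : List Nat → Bool
  | a :: b :: t => decide (a < b) && incN (b :: t)
  | _ => true

-- adjacent strict increase with an Int lower bound on the head
def incB (prev : Int) : List Nat → Bool
  | [] => true
  | d :: ds => decide (prev < (d : Int)) && incB d ds

theorem awLoop_eq_awChk (n : Nat) : ∀ prev cur : Int,
    awLoop (n : Int) prev cur = awChk prev cur (Nat.digits 10 n) := by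
  induction n using Nat.strong_induction_on with
  | _ n ih =>
    intro prev cur
    by_cases h0 : n = 0
    · subst h0; rw [awLoop]; simp [awChk]
    · rw [awLoop]
      have hpos : (0:Int) < (n : Int) := by exact_mod_cast Nat.pos_of_ne_zero h0
      rw [Nat.digits_def' (by norm_num : 1 < 10) (Nat.pos_of_ne_zero h0)]
      have hm : PySem.Int.mod (n : Int) 10 = ((n % 10 : Nat) : Int) := by
        rw [PySem.Int.mod_eq_emod_of_pos (by norm_num)]; omega
      have hd : PySem.Int.floordiv (n : Int) 10 = ((n / 10 : Nat) : Int) := by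
        rw [PySem.Int.floordiv_eq_ediv_of_pos (by norm_num)]; omega
      simp only [hpos, dif_pos, hm, hd, awChk]
      split_ifs with hle
      · rfl
      · exact ih (n / 10) (Nat.div_lt_self (Nat.pos_of_ne_zero h0) (by norm_num)) _ _

theorem awChk_isSome (L : List Nat) : ∀ prev cur : Int,
    (awChk prev cur L).isSome = incB prev L := by
  induction L with
  | nil => intro prev cur; rfl
  | cons d ds ih =>
    intro prev cur
    simp only [awChk, incB]
    split_ifs with h
    · simp [show ¬ prev < (d:Int) by omega]
    · simp [show prev < (d:Int) by omega, ih]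

theorem awChk_mem (L : List Nat) : ∀ prev cur v : Int,
    awChk prev cur L = some v → v = cur ∨ ∃ d ∈ L, v = (d : Int) := by
  induction L with
  | nil => intro prev cur v h; left; simpa [awChk] using h.symm
  | cons d ds ih =>
    intro prev cur v h
    simp only [awChk] at h
    split_ifs at h with hle
    rcases ih d d v h with h' | ⟨e, he, hv⟩
    · right; exact ⟨d, by simp, h'⟩
    · right; exact ⟨e, by simp [he], hv⟩

theorem incB_cast (ds : List Nat) : ∀ d : Nat, incB (d : Int) ds = incN (d :: ds) := by
  induction ds with
  | nil => intro d; rfl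
  | cons e t ih =>
    intro d
    simp only [incB, incN, ih e]
    congr 1
    simp

theorem incB_neg_one (L : List Nat) : incB (-1) L = incN L := by
  cases L with
  | nil => rfl
  | cons d ds =>
    simp only [incB, incB_cast]
    simp [show (-1:Int) < (d:Int) by omega]

-- adjacent strict decrease, Char list (B's all(a > b …))
def decC : List Char → Bool
  | a :: b :: t => decide (b < a) && decC (b :: t)
  | _ => true

theorem zipAll_eq_decC (M : List Char) :
    ((M.zip M.tail).all fun p => decide (p.2 < p.1)) = decC M := by
  induction M with
  | nil => rfl
  | cons a M ih =>
    cases M with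
    | nil => rfl
    | cons b t => simp only [List.tail_cons, List.zip_cons_cons, List.all_cons, decC, ← ih]

theorem decC_iff (M : List Char) : decC M = true ↔ List.IsChain (fun a b => b < a) M := by
  induction M with
  | nil => simp [decC]
  | cons a M ih =>
    cases M with
    | nil => simp [decC]
    | cons b t => simp [decC, ih, List.isChain_cons_cons]

theorem incN_iff (L : List Nat) : incN L = true ↔ List.IsChain (fun a b : Nat => a < b) L := by
  induction L with
  | nil => simp [incN]
  | cons a L ih =>
    cases L with
    | nil => simp [incN]
    | cons b t => simp [incN, ih, List.isChain_cons_cons]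

theorem digitChar_lt_iff : ∀ a : Nat, a < 10 → ∀ b : Nat, b < 10 →
    (Nat.digitChar a < Nat.digitChar b ↔ a < b) := by decide

theorem isChain_digitChar (L : List Nat) (hL : ∀ d ∈ L, d < 10) :
    List.IsChain (fun a b => Nat.digitChar a < Nat.digitChar b) L ↔
      List.IsChain (fun a b : Nat => a < b) L := by
  induction L with
  | nil => simp
  | cons a L ih =>
    cases L with
    | nil => simp
    | cons b t =>
      rw [List.isChain_cons_cons, List.isChain_cons_cons,
        ih (fun d hd => hL d (List.mem_cons_of_mem _ hd))]
      have := digitChar_lt_iff a (hL a (by simp)) b (hL b (by simp))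
      tauto

-- decC on the reversed digitChar image computes incN on the digit list
theorem decC_reverse_digitChar (L : List Nat) (hL : ∀ d ∈ L, d < 10) :
    decC ((L.map Nat.digitChar).reverse) = incN L := by
  rw [Bool.eq_iff_iff, decC_iff, incN_iff, List.isChain_reverse, List.isChain_map]
  exact isChain_digitChar L hL

-- str(n) for n > 0 is the digit list, MSB first
theorem toDigitsCore_eq (f : Nat) : ∀ n : Nat, ∀ ds : List Char, 0 < n → n < 10 ^ f →
    Nat.toDigitsCore 10 f n ds = ((Nat.digits 10 n).map Nat.digitChar).reverse ++ ds := by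
  induction f with
  | zero => intro n ds h1 h2; omega
  | succ f ih =>
    intro n ds h1 h2
    rw [Nat.toDigitsCore]
    rw [Nat.digits_def' (by norm_num : 1 < 10) h1]
    by_cases hz : n / 10 = 0
    · simp [hz]
    · have hlt : n / 10 < 10 ^ f := by
        rw [Nat.div_lt_iff_lt_mul (by norm_num : 0 < 10)]
        calc n < 10 ^ (f + 1) := h2
          _ = 10 ^ f * 10 := by ring
      rw [if_neg hz, ih (n / 10) _ (Nat.pos_of_ne_zero hz) hlt]
      simp

theorem toDigits_eq (n : Nat) (h : 0 < n) :
    Nat.toDigits 10 n = ((Nat.digits 10 n).map Nat.digitChar).reverse := by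
  have := toDigitsCore_eq (n + 1) n [] h
    (lt_of_lt_of_le (Nat.lt_pow_self (by norm_num)) (Nat.pow_le_pow_right (by norm_num) (by omega)))
  simpa [Nat.toDigits] using this

-- ===== VERDICT (by name: the statement is the Claim_ definition above) =====
theorem check_awesomeness_spec : Claim_equal_check_awesomeness := by
  intro x _ hpre
  unfold Pre_check_awesomeness at hpre
  unfold Spec_check_awesomeness check_awesomeness check_awesomeness_alt
  obtain ⟨n, rfl⟩ : ∃ n : Nat, x = (n : Int) := ⟨x.toNat, (Int.toNat_of_nonneg hpre).symm⟩
  by_cases h0 : n = 0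
  · subst h0
    rw [awLoop_eq_awChk]
    decide
  · have hn : 0 < n := Nat.pos_of_ne_zero h0
    have hd10 : ∀ d ∈ Nat.digits 10 n, d < 10 :=
      fun d hd => Nat.digits_lt_base (by norm_num) hd
    have htc : PySem.Int.toChars (n : Int) =
        ((Nat.digits 10 n).map Nat.digitChar).reverse := by
      unfold PySem.Int.toChars
      rw [if_neg (by omega)]
      simpa using toDigits_eq n hn
    rw [awLoop_eq_awChk, htc]
    by_cases h10 : n < 10
    · have hL : Nat.digits 10 n = [n] := by
        rw [Nat.digits_def' (by norm_num : 1 < 10) hn, Nat.mod_eq_of_lt h10,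
          Nat.div_eq_of_lt h10, Nat.digits_zero]
      rw [hL, if_pos (by exact_mod_cast h10)]
      simp [awChk, show ¬ (n : Int) ≤ -1 by omega]
    · rw [if_neg (by exact_mod_cast h10)]
      rw [zipAll_eq_decC, decC_reverse_digitChar _ hd10]
      cases hq : awChk (-1) 0 (Nat.digits 10 n) with
      | none =>
        have : incB (-1) (Nat.digits 10 n) = false := by
          have := awChk_isSome (Nat.digits 10 n) (-1) 0
          rw [hq] at this
          simpa using this.symm
        rw [incB_neg_one] at this
        simp [this]
      | some v =>
        have hvlt : v < 10 := by
          rcases awChk_mem _ _ _ _ hq with hv | ⟨d, hd, hv⟩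
          · omega
          · have := hd10 d hd; omega
        have hinc : incN (Nat.digits 10 n) = true := by
          have := awChk_isSome (Nat.digits 10 n) (-1) 0
          rw [hq] at this
          rw [← incB_neg_one]
          simpa using this.symm
        simp [show (n : Int) ≠ v by omega, hinc]
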